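-- pv_equiv track=rewrite | github.com/Liando18/deteksi-ddos | router.py | _choose_proto_from_field
-- ===== SOURCE A (Python) =====
-- def _choose_proto_from_field(proto_field: str):
--     if not proto_field:
--         return ('OTHER', 0)
--     parts = [p.strip() for p in proto_field.split(',') if p.strip()]
--     nums = []
--     for p in parts:
--         try:
--             nums.append(int(p))
--         except:
--             txt = p.upper()
--             if 'ICMP' in txt:
--                 return ('ICMP', 1)
--             if 'TCP' in txt:
--                 return ('TCP', 6)
--             if 'UDP' in txt:
--                 return ('UDP', 17)
--     for n in reversed(nums):
--         if n in (1, 6, 17):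
--             return ({1:'ICMP',6:'TCP',17:'UDP'}[n], n)
--     if nums:
--         n = nums[-1]
--         return ({1:'ICMP',6:'TCP',17:'UDP'}.get(n, f'PROTO_{n}'), n)
--     return ('OTHER', 0)
-- ===== SOURCE B (Python) =====
-- def _choose_proto_from_field(proto_field: str):
--     if not proto_field:
--         return ('OTHER', 0)
--     names = {1: 'ICMP', 6: 'TCP', 17: 'UDP'}
--     last_num = None
--     last_known = None
--     for p in proto_field.split(','):
--         p = p.strip()
--         if not p:
--             continue
--         try:
--             n = int(p)
--         except ValueError:
--             txt = p.upper()
--             if 'ICMP' in txt: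
--                 return ('ICMP', 1)
--             if 'TCP' in txt:
--                 return ('TCP', 6)
--             if 'UDP' in txt:
--                 return ('UDP', 17)
--             continue
--         last_num = n
--         if n in (1, 6, 17):
--             last_known = n
--     if last_known is not None:
--         return (names[last_known], last_known)
--     if last_num is not None:
--         return (names.get(last_num, f'PROTO_{last_num}'), last_num)
--     return ('OTHER', 0)
-- ===== Notes on version B (the rewrite author's own statement) =====
-- stated objective: simpler
-- what changed: Single pass keeping two scalars (last parsed int, last known protocol number) instead of accumulating a nums list and re-scanning it with a second reversed loop.
import Mathlib
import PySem

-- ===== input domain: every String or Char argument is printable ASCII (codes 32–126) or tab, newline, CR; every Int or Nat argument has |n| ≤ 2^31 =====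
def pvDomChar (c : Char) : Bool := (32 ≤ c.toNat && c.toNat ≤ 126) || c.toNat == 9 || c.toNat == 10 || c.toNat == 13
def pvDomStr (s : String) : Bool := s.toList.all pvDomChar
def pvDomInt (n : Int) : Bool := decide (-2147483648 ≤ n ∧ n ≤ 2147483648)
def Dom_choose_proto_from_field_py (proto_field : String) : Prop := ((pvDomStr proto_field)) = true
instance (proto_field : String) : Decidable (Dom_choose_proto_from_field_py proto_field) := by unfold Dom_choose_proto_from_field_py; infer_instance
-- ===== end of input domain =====

-- B replaces A's accumulated nums list and second reversed scan by a single pass keeping two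
-- scalars (last parsed int, last parsed known protocol number); simpler, same return value.

-- ===== PORT A =====
-- the dict literal {1:'ICMP',6:'TCP',17:'UDP'} A builds at each use
-- (Dict.mk of the pair list = Dict.ofList here, the keys being distinct literals)
def pvProtoA : PySem.Dict Int String := PySem.Dict.mk [(1, "ICMP"), (6, "TCP"), (17, "UDP")]

-- 'for n in reversed(nums): …' then the post-loop tail; first arg is reversed(nums), second the full nums
def pvARev : List Int → List Int → String × Int
  | [], nums =>
    if nums.isEmpty then ("OTHER", 0)
    else
      -- n = nums[-1]; nums is nonempty here, so pyGet? is some and getD's default 0 is never used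
      let n := (PySem.List.pyGet? nums (-1)).getD 0
      (pvProtoA.getD n ("PROTO_" ++ PySem.Int.toStr n), n)
  | n :: rest, nums =>
    -- {…}[n]: the guard n ∈ (1, 6, 17) makes KeyError impossible, so getD's default "" is never used
    if n == 1 || n == 6 || n == 17 then (pvProtoA.getD n "", n)
    else pvARev rest nums

-- 'for p in parts: try: nums.append(int(p)) except: txt = p.upper(); …'
def pvALoop : List String → List Int → String × Int
  | [], nums => pvARev nums.reverse nums
  | p :: rest, nums =>
    match PySem.Int.ofStr? p with
    | some n => pvALoop rest (nums ++ [n])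
    | none =>
      let txt := PySem.Str.upper p
      if PySem.Str.isIn "ICMP" txt then ("ICMP", 1)
      else if PySem.Str.isIn "TCP" txt then ("TCP", 6)
      else if PySem.Str.isIn "UDP" txt then ("UDP", 17)
      else pvALoop rest nums

def choose_proto_from_field_py (proto_field : String) : String × Int :=
  if proto_field = "" then ("OTHER", 0)
  else
    -- parts = [p.strip() for p in proto_field.split(',') if p.strip()]
    let parts := ((PySem.Str.split? proto_field ",").getD []).filterMap
      (fun p => let s := PySem.Str.strip p; if s = "" then none else some s)
    pvALoop parts []

-- ===== PORT B =====
-- B's names = {1: 'ICMP', 6: 'TCP', 17: 'UDP'}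
def pvProtoB : PySem.Dict Int String := PySem.Dict.mk [(1, "ICMP"), (6, "TCP"), (17, "UDP")]

-- the code after B's loop
def pvBFinish (lastNum lastKnown : Option Int) : String × Int :=
  match lastKnown with
  | some n => (pvProtoB.getD n "", n)   -- names[last_known]: the key is present by construction
  | none =>
    match lastNum with
    | some n => (pvProtoB.getD n ("PROTO_" ++ PySem.Int.toStr n), n)
    | none => ("OTHER", 0)

-- B's single loop over the raw comma tokens, carrying last_num and last_known
def pvBLoop : List String → Option Int → Option Int → String × Int
  | [], lastNum, lastKnown => pvBFinish lastNum lastKnown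
  | p :: rest, lastNum, lastKnown =>
    let s := PySem.Str.strip p
    if s = "" then pvBLoop rest lastNum lastKnown
    else
      match PySem.Int.ofStr? s with
      | some n => pvBLoop rest (some n) (if n == 1 || n == 6 || n == 17 then some n else lastKnown)
      | none =>
        let txt := PySem.Str.upper s
        if PySem.Str.isIn "ICMP" txt then ("ICMP", 1)
        else if PySem.Str.isIn "TCP" txt then ("TCP", 6)
        else if PySem.Str.isIn "UDP" txt then ("UDP", 17)
        else pvBLoop rest lastNum lastKnown

def choose_proto_from_field_py_alt (proto_field : String) : String × Int :=
  if proto_field = "" then ("OTHER", 0)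
  else pvBLoop ((PySem.Str.split? proto_field ",").getD []) none none

-- ===== PRECONDITION & SPEC =====
def Spec_choose_proto_from_field_py (proto_field : String) (out : String × Int) : Prop := out = choose_proto_from_field_py_alt proto_field
instance (proto_field : String) (out : String × Int) : Decidable (Spec_choose_proto_from_field_py proto_field out) := by unfold Spec_choose_proto_from_field_py; infer_instance

-- ===== CLAIM (what is proved, stated in full; the proofs are below) =====
def Claim_equal_choose_proto_from_field_py : Prop := ∀ (proto_field : String), Dom_choose_proto_from_field_py proto_field → Spec_choose_proto_from_field_py proto_field (choose_proto_from_field_py proto_field)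

-- ===== LEMMAS AND PROOFS =====

-- A's reversed scan is a find? over reversed(nums), falling through to the post-loop tail
theorem pvARev_find (rev nums : List Int) :
    pvARev rev nums
      = match rev.find? (fun n => n == 1 || n == 6 || n == 17) with
        | some n => (pvProtoA.getD n "", n)
        | none => pvARev [] nums := by
  induction rev with
  | nil => simp [List.find?]
  | cons n rest ih =>
    by_cases h : (n == 1 || n == 6 || n == 17) = true
    · simp [pvARev, List.find?, h]
    · simp [pvARev, List.find?, h, ih]

-- A's second scan + tail equals B's finish, at the state B's scalars hold for a given nums
theorem pvTail_eq (nums : List Int) :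
    pvARev nums.reverse nums
      = pvBFinish nums.getLast? (nums.reverse.find? (fun n => n == 1 || n == 6 || n == 17)) := by
  rw [pvARev_find]
  cases hf : nums.reverse.find? (fun n => n == 1 || n == 6 || n == 17) with
  | some n => simp [pvBFinish, pvProtoA, pvProtoB]
  | none =>
    cases hn : nums.getLast? with
    | none =>
      have : nums = [] := by simpa using hn
      simp [this, pvARev, pvBFinish]
    | some m =>
      obtain ⟨ys, rfl⟩ := List.getLast?_eq_some_iff.mp hn
      simp [pvARev, pvBFinish, pvProtoA, pvProtoB]

-- the two loops agree whenever B's two scalars summarise A's nums list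
theorem pvLoop_eq (toks : List String) (nums : List Int) :
    pvALoop (toks.filterMap
        (fun p => let s := PySem.Str.strip p; if s = "" then none else some s)) nums
      = pvBLoop toks nums.getLast? (nums.reverse.find? (fun n => n == 1 || n == 6 || n == 17)) := by
  induction toks generalizing nums with
  | nil => simpa [pvALoop, pvBLoop] using pvTail_eq nums
  | cons p rest ih =>
    by_cases hs : PySem.Str.strip p = ""
    · simpa [List.filterMap_cons, hs, pvBLoop] using ih nums
    · cases hparse : PySem.Int.ofStr? (PySem.Str.strip p) with
      | some n =>
        have h1 : (nums ++ [n]).getLast? = some n := by simp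
        have h2 : (nums ++ [n]).reverse.find? (fun n => n == 1 || n == 6 || n == 17)
            = if n == 1 || n == 6 || n == 17 then some n
              else nums.reverse.find? (fun n => n == 1 || n == 6 || n == 17) := by
          by_cases h : (n == 1 || n == 6 || n == 17) = true <;>
            simp [List.find?, h]
        have := ih (nums ++ [n])
        rw [h1, h2] at this
        simpa [List.filterMap_cons, hs, pvALoop, pvBLoop, hparse] using this
      | none =>
        simp [List.filterMap_cons, hs, pvALoop, pvBLoop, hparse, ih nums]

-- ===== VERDICT (by name: the statement is the Claim_ definition above) =====
theorem choose_proto_from_field_py_spec : Claim_equal_choose_proto_from_field_py := by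
  intro s _
  unfold Spec_choose_proto_from_field_py choose_proto_from_field_py choose_proto_from_field_py_alt
  by_cases h : s = ""
  · simp [h]
  · have hl := pvLoop_eq ((PySem.Str.split? s ",").getD []) []
    simp only [List.getLast?_nil, List.reverse_nil, List.find?_nil] at hl
    simp only [if_neg h]
    exact hl
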